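-- pv_equiv track=rewrite | github.com/magimetal/dw-port-experiment | extractor/maps.py | _convert_map_tiles
-- ===== SOURCE A (Python) =====
-- OVERWORLD_MAP_ID = 1
--
-- MAP_TANTCSTL_SL = 0x0C
--
-- WRLD_BLK_CONV_TBL = [
--     0x00,  # BLK_GRASS
--     0x01,  # BLK_SAND
--     0x02,  # BLK_HILL
--     0x12,  # BLK_MOUNTAIN
--     0x0F,  # BLK_WATER (shore variants are runtime-resolved by DoWtrConv)
--     0x10,  # BLK_STONE
--     0x0B,  # BLK_TREES
--     0x06,  # BLK_SWAMP
--     0x07,  # BLK_TOWN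
--     0x08,  # BLK_CAVE
--     0x09,  # BLK_CASTLE
--     0x0A,  # BLK_BRIDGE
--     0x05,  # BLK_STAIR_DN
-- ]
--
-- TOWN_BLK_CONV_TBL = [
--     0x00,  # BLK_GRASS
--     0x01,  # BLK_SAND
--     0x0F,  # BLK_WATER
--     0x0C,  # BLK_CHEST
--     0x10,  # BLK_STONE
--     0x03,  # BLK_STAIR_UP
--     0x04,  # BLK_BRICK
--     0x05,  # BLK_STAIR_DN
--     0x0B,  # BLK_TREES
--     0x06,  # BLK_SWAMP
--     0x0D,  # BLK_FFIELD
--     0x11,  # BLK_DOOR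
--     0x13,  # BLK_SHOP
--     0x14,  # BLK_INN
--     0x0A,  # BLK_BRIDGE
--     0x0E,  # BLK_LRG_TILE
-- ]
--
-- DUNGEON_BLK_CONV_TBL = [
--     0x10,  # BLK_STONE
--     0x03,  # BLK_STAIR_UP
--     0x04,  # BLK_BRICK
--     0x05,  # BLK_STAIR_DN
--     0x0C,  # BLK_CHEST
--     0x11,  # BLK_DOOR
--     0x17,  # BLK_PRINCESS
--     0x16,  # BLK_BLANK
-- ]
--
-- _SHRINE_FAMILY_REVERSE_STAIR_COORDS: dict[int, frozenset[tuple[int, int]]] = {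
--     12: frozenset({(0, 4)}),
--     13: frozenset({(4, 9)}),
--     14: frozenset({(0, 4)}),
-- }
--
-- def _convert_block_id(map_id: int, raw_block_id: int) -> int:
--     block = raw_block_id & 0xFF
--     if map_id == OVERWORLD_MAP_ID:
--         return WRLD_BLK_CONV_TBL[block] if block < len(WRLD_BLK_CONV_TBL) else block
--
--     if map_id < MAP_TANTCSTL_SL:
--         return TOWN_BLK_CONV_TBL[block & 0x0F]
--
--     return DUNGEON_BLK_CONV_TBL[block & 0x07]
--
-- def _convert_map_tiles(map_id: int, tiles: list[list[int]]) -> list[list[int]]: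
--     converted_rows: list[list[int]] = []
--     override_coords = _SHRINE_FAMILY_REVERSE_STAIR_COORDS.get(map_id, frozenset())
--     for y_pos, row in enumerate(tiles):
--         converted_row: list[int] = []
--         for x_pos, tile in enumerate(row):
--             if (x_pos, y_pos) in override_coords and (tile & 0x0F) == 0x05:
--                 converted_row.append(TOWN_BLK_CONV_TBL[0x05])
--                 continue
--             converted_row.append(_convert_block_id(map_id, tile))
--         converted_rows.append(converted_row)
--     return converted_rows
-- ===== SOURCE B (Python) =====
-- OVERWORLD_MAP_ID = 1
-- MAP_TANTCSTL_SL = 0x0C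
--
-- WRLD_BLK_CONV_TBL = [0x00, 0x01, 0x02, 0x12, 0x0F, 0x10, 0x0B, 0x06, 0x07, 0x08, 0x09, 0x0A, 0x05]
--
-- TOWN_BLK_CONV_TBL = [0x00, 0x01, 0x0F, 0x0C, 0x10, 0x03, 0x04, 0x05,
--                      0x0B, 0x06, 0x0D, 0x11, 0x13, 0x14, 0x0A, 0x0E]
--
-- DUNGEON_BLK_CONV_TBL = [0x10, 0x03, 0x04, 0x05, 0x0C, 0x11, 0x17, 0x16]
--
-- _SHRINE_FAMILY_REVERSE_STAIR_COORDS = {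
--     12: frozenset({(0, 4)}),
--     13: frozenset({(4, 9)}),
--     14: frozenset({(0, 4)}),
-- }
--
-- def _convert_block_id(map_id, raw_block_id):
--     block = raw_block_id & 0xFF
--     if map_id == OVERWORLD_MAP_ID:
--         return WRLD_BLK_CONV_TBL[block] if block < len(WRLD_BLK_CONV_TBL) else block
--     if map_id < MAP_TANTCSTL_SL:
--         return TOWN_BLK_CONV_TBL[block & 0x0F]
--     return DUNGEON_BLK_CONV_TBL[block & 0x07]
--
-- def _convert_map_tiles(map_id, tiles):
--     # Memoise the conversion once into a full 256-entry lookup table, so each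
--     # tile becomes a single table index instead of re-running the branchy
--     # conversion logic; then sparsely patch the few shrine-override coordinates.
--     tbl = [_convert_block_id(map_id, b) for b in range(256)]
--     out = [[tbl[t & 0xFF] for t in row] for row in tiles]
--     for x, y in _SHRINE_FAMILY_REVERSE_STAIR_COORDS.get(map_id, ()):
--         if y < len(tiles) and x < len(tiles[y]) and (tiles[y][x] & 0x0F) == 0x05:
--             out[y][x] = TOWN_BLK_CONV_TBL[0x05]
--     return out
-- ===== Notes on version B (the rewrite author's own statement) =====
-- stated objective: faster
-- what changed: A runs the branchy _convert_block_id conversion plus an override-set membership test per tile inside nested loops; B memoises the conversion into a 256-entry lookup table built once, converts every tile by a single table index, and patches the (at most one) shrine-override coordinate in a separate sparse bounds-checked pass over the original grid.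
import Mathlib
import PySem

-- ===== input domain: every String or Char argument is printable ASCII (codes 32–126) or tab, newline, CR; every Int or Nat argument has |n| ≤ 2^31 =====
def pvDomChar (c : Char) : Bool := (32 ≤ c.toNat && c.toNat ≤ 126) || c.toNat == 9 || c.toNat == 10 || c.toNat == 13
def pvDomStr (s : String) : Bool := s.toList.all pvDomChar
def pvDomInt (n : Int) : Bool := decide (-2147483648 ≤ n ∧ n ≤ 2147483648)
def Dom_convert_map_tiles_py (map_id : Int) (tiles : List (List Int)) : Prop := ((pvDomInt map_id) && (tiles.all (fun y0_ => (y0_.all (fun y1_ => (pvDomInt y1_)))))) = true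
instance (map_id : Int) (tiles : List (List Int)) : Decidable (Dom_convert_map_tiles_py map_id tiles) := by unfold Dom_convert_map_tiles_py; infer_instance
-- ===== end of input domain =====

-- B memoises the conversion into a 256-entry lookup table built once, indexes it per tile,
-- and patches the shrine-override coordinate in a separate sparse pass; A branches per tile.

-- shared module context: the three conversion tables and _convert_block_id
def wrldTbl : List Int := [0x00, 0x01, 0x02, 0x12, 0x0F, 0x10, 0x0B, 0x06, 0x07, 0x08, 0x09, 0x0A, 0x05]
def townTbl : List Int := [0x00, 0x01, 0x0F, 0x0C, 0x10, 0x03, 0x04, 0x05, 0x0B, 0x06, 0x0D, 0x11, 0x13, 0x14, 0x0A, 0x0E]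
def dungTbl : List Int := [0x10, 0x03, 0x04, 0x05, 0x0C, 0x11, 0x17, 0x16]

-- Python's `n & 0xFF` (mask by 2^k - 1) is exactly floor-mod by 2^k, for every int n
def convBlockId (map_id raw : Int) : Int :=
  let block := PySem.Int.mod raw 256
  if map_id = 1 then
    (if block < 13 then wrldTbl.getD block.toNat 0 else block)
  else if map_id < 12 then townTbl.getD (PySem.Int.mod block 16).toNat 0
  else dungTbl.getD (PySem.Int.mod block 8).toNat 0

-- _SHRINE_FAMILY_REVERSE_STAIR_COORDS.get(map_id, ()) as a coordinate list
def ovCoords (map_id : Int) : List (Int × Int) :=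
  if map_id = 12 then [(0, 4)]
  else if map_id = 13 then [(4, 9)]
  else if map_id = 14 then [(0, 4)]
  else []

-- ===== PORT A =====
-- inner loop: for x_pos, tile in enumerate(row)
def innerA (ov : List (Int × Int)) (map_id y : Int) : Int → List Int → List Int
  | _, [] => []
  | x, t :: rest =>
    (if (x, y) ∈ ov ∧ PySem.Int.mod t 16 = 5 then townTbl.getD 5 0 else convBlockId map_id t)
      :: innerA ov map_id y (x + 1) rest

-- outer loop: for y_pos, row in enumerate(tiles)
def outerA (ov : List (Int × Int)) (map_id : Int) : Int → List (List Int) → List (List Int)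
  | _, [] => []
  | y, row :: rest => innerA ov map_id y 0 row :: outerA ov map_id (y + 1) rest

def convert_map_tiles_py (map_id : Int) (tiles : List (List Int)) : List (List Int) :=
  outerA (ovCoords map_id) map_id 0 tiles

-- ===== PORT B =====
-- tbl = [_convert_block_id(map_id, b) for b in range(256)]; out = [[tbl[t & 0xFF] …]];
-- then the sparse override patch pass over the original grid
def convert_map_tiles_py_alt (map_id : Int) (tiles : List (List Int)) : List (List Int) :=
  let tbl := (PySem.List.pyRange 0 256 1).map (fun b => convBlockId map_id b)
  let out := tiles.map (fun row => row.map (fun t => PySem.List.pyGetD tbl (PySem.Int.mod t 256) 0))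
  (ovCoords map_id).foldl (fun acc xy =>
    if xy.2 < (tiles.length : Int)
        ∧ xy.1 < ((tiles.getD xy.2.toNat []).length : Int)
        ∧ PySem.Int.mod ((tiles.getD xy.2.toNat []).getD xy.1.toNat 0) 16 = 5
    then acc.set xy.2.toNat ((acc.getD xy.2.toNat []).set xy.1.toNat (townTbl.getD 5 0))
    else acc) out

-- ===== PRECONDITION & SPEC =====
def Spec_convert_map_tiles_py (map_id : Int) (tiles : List (List Int)) (out : List (List Int)) : Prop := out = convert_map_tiles_py_alt map_id tiles
instance (map_id : Int) (tiles : List (List Int)) (out : List (List Int)) : Decidable (Spec_convert_map_tiles_py map_id tiles out) := by unfold Spec_convert_map_tiles_py; infer_instance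

-- ===== CLAIM (what is proved, stated in full; the proofs are below) =====
def Claim_equal_convert_map_tiles_py : Prop := ∀ (map_id : Int) (tiles : List (List Int)), Dom_convert_map_tiles_py map_id tiles → Spec_convert_map_tiles_py map_id tiles (convert_map_tiles_py map_id tiles)

-- ===== LEMMAS AND PROOFS =====

-- the 256-entry table, indexed at t & 0xFF, is exactly convBlockId
lemma tbl_lookup (m t : Int) :
    PySem.List.pyGetD ((PySem.List.pyRange 0 256 1).map (fun b => convBlockId m b))
      (PySem.Int.mod t 256) 0 = convBlockId m t := by
  have h0 : (0:Int) < 256 := by norm_num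
  have hlo := PySem.Int.mod_nonneg t h0
  have hhi := PySem.Int.mod_lt t h0
  rw [PySem.List.pyGetD_map_pyRange_of_nonneg _ _ _ _ hlo hhi]
  have hidem : PySem.Int.mod (PySem.Int.mod t 256) 256 = PySem.Int.mod t 256 := by
    simp only [PySem.Int.mod_eq_emod_of_pos h0]
    omega
  simp only [convBlockId, hidem]

lemma innerA_nil (m y : Int) : ∀ (x : Int) (row : List Int),
    innerA [] m y x row = row.map (convBlockId m)
  | _, [] => by simp [innerA]
  | x, t :: rest => by simp [innerA, innerA_nil m y (x + 1) rest]

lemma outerA_nil (m : Int) : ∀ (y : Int) (tiles : List (List Int)),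
    outerA [] m y tiles = tiles.map (fun r => r.map (convBlockId m))
  | _, [] => by simp [outerA]
  | y, row :: rest => by simp [outerA, innerA_nil, outerA_nil m (y + 1) rest]

lemma innerA_offrow (m x0 y0 y : Int) (hy : y ≠ y0) : ∀ (x : Int) (row : List Int),
    innerA [(x0, y0)] m y x row = row.map (convBlockId m)
  | _, [] => by simp [innerA]
  | x, t :: rest => by
      simp [innerA, innerA_offrow m x0 y0 y hy (x + 1) rest, Prod.ext_iff, hy]

lemma innerA_single (m x0 y0 : Int) (row : List Int) : ∀ (x : Int), 0 ≤ x →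
    innerA [(x0, y0)] m y0 x row =
      if x ≤ x0 ∧ (x0 - x).toNat < row.length
          ∧ PySem.Int.mod (row.getD (x0 - x).toNat 0) 16 = 5
      then (row.map (convBlockId m)).set (x0 - x).toNat (townTbl.getD 5 0)
      else row.map (convBlockId m) := by
  induction row with
  | nil => intro x _; simp [innerA]
  | cons t rest ih =>
    intro x hx
    rw [innerA, ih (x + 1) (by omega)]
    by_cases hxx : x = x0
    · have h0 : (x0 - x).toNat = 0 := by omega
      rw [if_neg (show ¬ (x + 1 ≤ x0 ∧ _ ∧ _) from fun h => by omega)]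
      rw [h0]
      by_cases hP : PySem.Int.mod t 16 = 5
      · rw [if_pos (show ((x, y0) ∈ [(x0, y0)]) ∧ _ from ⟨by simp [hxx], hP⟩)]
        rw [if_pos (show x ≤ x0 ∧ (0:Nat) < (t :: rest).length ∧ _ from
          ⟨by omega, by simp, by simpa using hP⟩)]
        simp
      · rw [if_neg (fun h => hP h.2)]
        rw [if_neg (show ¬ (x ≤ x0 ∧ (0:Nat) < (t :: rest).length ∧ _) from
          fun h => hP (by simpa using h.2.2))]
        simp
    · have hmem : ¬ (((x, y0) ∈ [(x0, y0)]) ∧ PySem.Int.mod t 16 = 5) := by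
        simp [Prod.ext_iff, hxx]
      rw [if_neg hmem]
      by_cases h1 : x + 1 ≤ x0
      · have hk : (x0 - x).toNat = (x0 - (x + 1)).toNat + 1 := by omega
        rw [hk]
        simp only [List.length_cons, List.getD_cons_succ, List.map_cons]
        by_cases h2 : (x0 - (x + 1)).toNat < rest.length ∧
            PySem.Int.mod (rest.getD (x0 - (x + 1)).toNat 0) 16 = 5
        · rw [if_pos ⟨h1, h2.1, h2.2⟩, if_pos ⟨by omega, by omega, h2.2⟩]
          rfl
        · rw [if_neg (fun h => h2 ⟨h.2.1, h.2.2⟩), if_neg (fun h => h2 ⟨by omega, h.2.2⟩)]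
      · rw [if_neg (fun h => h1 h.1), if_neg (fun h => by omega)]
        rfl

lemma outerA_single (m x0 y0 : Int) (hx0 : 0 ≤ x0) (tiles : List (List Int)) : ∀ (y : Int), 0 ≤ y →
    outerA [(x0, y0)] m y tiles =
      if y ≤ y0 ∧ (y0 - y).toNat < tiles.length
          ∧ x0.toNat < (tiles.getD (y0 - y).toNat []).length
          ∧ PySem.Int.mod ((tiles.getD (y0 - y).toNat []).getD x0.toNat 0) 16 = 5
      then (tiles.map (fun r => r.map (convBlockId m))).set (y0 - y).toNat
             (((tiles.getD (y0 - y).toNat []).map (convBlockId m)).set x0.toNat (townTbl.getD 5 0))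
      else tiles.map (fun r => r.map (convBlockId m)) := by
  induction tiles with
  | nil => intro y _; simp [outerA]
  | cons row rest ih =>
    intro y hy
    rw [outerA, ih (y + 1) (by omega)]
    by_cases hyy : y = y0
    · rw [if_neg (show ¬ (y + 1 ≤ y0 ∧ _ ∧ _ ∧ _) from fun h => by omega)]
      rw [hyy, (by omega : (y0 - y0).toNat = 0), innerA_single m x0 y0 row 0 le_rfl]
      simp only [sub_zero, List.getD_cons_zero, List.length_cons, List.map_cons]
      by_cases h2 : x0.toNat < row.length ∧ PySem.Int.mod (row.getD x0.toNat 0) 16 = 5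
      · rw [if_pos ⟨hx0, h2.1, h2.2⟩, if_pos ⟨by omega, by omega, h2.1, h2.2⟩]
        rfl
      · rw [if_neg (fun h => h2 ⟨h.2.1, h.2.2⟩), if_neg (fun h => h2 ⟨h.2.2.1, h.2.2.2⟩)]
    · rw [innerA_offrow m x0 y0 y hyy]
      by_cases h1 : y + 1 ≤ y0
      · have hk : (y0 - y).toNat = (y0 - (y + 1)).toNat + 1 := by omega
        rw [hk]
        simp only [List.length_cons, List.getD_cons_succ, List.map_cons]
        by_cases h2 : (y0 - (y + 1)).toNat < rest.length ∧
            x0.toNat < (rest.getD (y0 - (y + 1)).toNat []).length ∧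
            PySem.Int.mod ((rest.getD (y0 - (y + 1)).toNat []).getD x0.toNat 0) 16 = 5
        · rw [if_pos ⟨h1, h2.1, h2.2.1, h2.2.2⟩, if_pos ⟨by omega, by omega, h2.2.1, h2.2.2⟩]
          rfl
        · rw [if_neg (fun h => h2 ⟨h.2.1, h.2.2.1, h.2.2.2⟩),
              if_neg (fun h => h2 ⟨by omega, h.2.2.1, h.2.2.2⟩)]
      · rw [if_neg (fun h => h1 h.1), if_neg (fun h => by omega)]
        rfl

lemma getD_map_nested (m : Int) (l : List (List Int)) (n : Nat) (h : n < l.length) :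
    (l.map (fun r => r.map (convBlockId m))).getD n [] = (l.getD n []).map (convBlockId m) := by
  rw [List.getD_eq_getElem _ _ (by simpa using h), List.getElem_map,
    List.getD_eq_getElem _ _ h]

lemma single_patch (m x0 y0 : Int) (hx0 : 0 ≤ x0) (hy0 : 0 ≤ y0) (tiles : List (List Int)) :
    outerA [(x0, y0)] m 0 tiles =
      (let conv := tiles.map (fun row => row.map (fun t => convBlockId m t))
       if y0 < (tiles.length : Int)
            ∧ x0 < ((tiles.getD y0.toNat []).length : Int)
            ∧ PySem.Int.mod ((tiles.getD y0.toNat []).getD x0.toNat 0) 16 = 5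
       then conv.set y0.toNat ((conv.getD y0.toNat []).set x0.toNat (townTbl.getD 5 0))
       else conv) := by
  rw [outerA_single m x0 y0 hx0 tiles 0 le_rfl]
  simp only [sub_zero]
  split_ifs with hA hB hB
  · obtain ⟨_, hlen, _, _⟩ := hA
    rw [getD_map_nested m tiles y0.toNat hlen]
  · exact absurd ⟨by omega, by omega, hA.2.2.2⟩ hB
  · obtain ⟨hl1, hl2, hP⟩ := hB
    exact absurd ⟨hy0, by omega, by omega, hP⟩ hA
  · rfl

-- ===== VERDICT (by name: the statement is the Claim_ definition above) =====
theorem convert_map_tiles_py_spec : Claim_equal_convert_map_tiles_py := by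
  intro mid tiles _
  show convert_map_tiles_py mid tiles = convert_map_tiles_py_alt mid tiles
  unfold convert_map_tiles_py convert_map_tiles_py_alt
  simp only [tbl_lookup]
  by_cases h12 : mid = 12
  · subst h12
    simpa [ovCoords] using single_patch 12 0 4 (by omega) (by omega) tiles
  · by_cases h13 : mid = 13
    · subst h13
      simpa [ovCoords] using single_patch 13 4 9 (by omega) (by omega) tiles
    · by_cases h14 : mid = 14
      · subst h14
        simpa [ovCoords] using single_patch 14 0 4 (by omega) (by omega) tiles
      · simp [ovCoords, h12, h13, h14, outerA_nil]
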